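-- pv_equiv track=rewrite | github.com/Oddo94/Tic-Tac-Toe | game_state.py | is_column_win
-- ===== SOURCE A (Python) =====
-- WIN_CONDITION = 3
--
-- def is_column_win(playing_field, character_to_check):
--     count = 0
--     for col in range(len(playing_field[0])):
--         count = 0
--         for row in range(len(playing_field)):
--             if playing_field[row][col] == character_to_check:
--                 count += 1
--             if count == WIN_CONDITION:
--                 return True
--
--     return False
-- ===== SOURCE B (Python) =====
-- WIN_CONDITION = 3
--
-- def is_column_win(playing_field, character_to_check):
--     counts = [0] * len(playing_field[0])
--     for row in playing_field:
--         for col in range(len(counts)):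
--             if row[col] == character_to_check:
--                 counts[col] += 1
--                 if counts[col] == WIN_CONDITION:
--                     return True
--     return False
-- ===== Notes on version B (the rewrite author's own statement) =====
-- stated objective: alternative
-- what changed: B replaces A's column-major rescans (a fresh scalar counter per column, re-walking all rows for each column) by a single row-major pass that maintains an array of per-column running counts.
-- outside the precondition, e.g. on is_column_win([['x', 'o'], ['x'], ['x', 'o']], 'x'): A returns True, B raises IndexError
import Mathlib
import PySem

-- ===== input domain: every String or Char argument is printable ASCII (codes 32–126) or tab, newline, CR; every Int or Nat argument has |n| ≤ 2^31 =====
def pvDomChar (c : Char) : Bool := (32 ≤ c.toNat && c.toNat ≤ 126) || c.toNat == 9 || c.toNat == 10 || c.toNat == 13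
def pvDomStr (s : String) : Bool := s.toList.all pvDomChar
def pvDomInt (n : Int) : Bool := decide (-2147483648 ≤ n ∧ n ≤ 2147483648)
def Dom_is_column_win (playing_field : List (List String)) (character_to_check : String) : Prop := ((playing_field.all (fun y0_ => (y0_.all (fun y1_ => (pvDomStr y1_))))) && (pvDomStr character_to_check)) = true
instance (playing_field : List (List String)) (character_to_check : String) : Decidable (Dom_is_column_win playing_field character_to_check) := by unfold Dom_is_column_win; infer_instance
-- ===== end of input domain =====

-- B: single row-major pass maintaining a per-column running-count array, instead of A's
-- column-major rescans with a scalar counter; return-value equivalence on non-ragged boards.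
-- ===== PORT A =====
-- inner loop of A over the rows, for a fixed column, carrying the running count
def aCol (c : String) (col : Nat) : Int → List (List String) → Bool
  | _, [] => false
  | count, r :: rs =>
    match r[col]? with
    | none => false  -- Python raises IndexError here; excluded by Pre_
    | some v =>
      let count' := if v == c then count + 1 else count
      if count' == 3 then true else aCol c col count' rs

-- outer loop of A over the column indices
def aCols (pf : List (List String)) (c : String) : List Nat → Bool
  | [] => false
  | col :: cols => if aCol c col 0 pf then true else aCols pf c cols

def is_column_win (playing_field : List (List String)) (character_to_check : String) : Bool :=
  match playing_field with
  | [] => false  -- Python raises IndexError on playing_field[0]; excluded by Pre_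
  | r0 :: _ => aCols playing_field character_to_check (List.range r0.length)

-- ===== PORT B =====
-- B's inner loop over the column indices of one row, updating the counts array
def bInner (row : List String) (c : String) : List Nat → List Int → Option (List Int)
  | [], counts => some counts
  | col :: cols, counts =>
    match row[col]? with
    | none => some counts  -- Python raises IndexError here; excluded by Pre_
    | some v =>
      if v == c then
        let counts' := counts.set col (counts.getD col 0 + 1)
        if counts'.getD col 0 == 3 then none  -- early return True
        else bInner row c cols counts'
      else bInner row c cols counts

-- B's outer loop over the rows, carrying the counts array
def bOuter (c : String) : List (List String) → List Int → Bool
  | [], _ => false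
  | r :: rs, counts =>
    match bInner r c (List.range counts.length) counts with
    | none => true
    | some counts' => bOuter c rs counts'

def is_column_win_alt (playing_field : List (List String)) (character_to_check : String) : Bool :=
  match playing_field with
  | [] => false  -- Python raises IndexError on playing_field[0]; excluded by Pre_
  | r0 :: _ => bOuter character_to_check playing_field (List.replicate r0.length 0)

-- ===== PRECONDITION & SPEC =====
-- Pre_ excludes the empty board (A raises IndexError on playing_field[0]) and ragged boards
-- whose later rows are shorter than the first row: there A either raises IndexError or, when a
-- win is found before the short cell is indexed, returns True while B (indexing in row-major
-- order) raises IndexError first.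
def Pre_is_column_win (playing_field : List (List String)) (character_to_check : String) : Prop :=
  playing_field ≠ [] ∧ ∀ r ∈ playing_field, (playing_field.headI).length ≤ r.length
instance (playing_field : List (List String)) (character_to_check : String) : Decidable (Pre_is_column_win playing_field character_to_check) := by unfold Pre_is_column_win; infer_instance

def pvWitness_is_column_win : List (List String) × String :=
  ([["x", "o"], ["o", "x"], ["x", "o"]], "x")

def Spec_is_column_win (playing_field : List (List String)) (character_to_check : String) (out : Bool) : Prop := out = is_column_win_alt playing_field character_to_check
instance (playing_field : List (List String)) (character_to_check : String) (out : Bool) : Decidable (Spec_is_column_win playing_field character_to_check out) := by unfold Spec_is_column_win; infer_instance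

-- ===== CLAIM (what is proved, stated in full; the proofs are below) =====
def Claim_equal_is_column_win : Prop := ∀ (playing_field : List (List String)) (character_to_check : String), Dom_is_column_win playing_field character_to_check → Pre_is_column_win playing_field character_to_check → Spec_is_column_win playing_field character_to_check (is_column_win playing_field character_to_check)

-- ===== LEMMAS AND PROOFS =====

-- number of matches of c in column col of pf
def colCnt (c : String) (col : Nat) (pf : List (List String)) : Nat :=
  pf.countP (fun r => r.getD col "" == c)

theorem getD_set_self' (l : List Int) (i : Nat) (v : Int) (h : i < l.length) :
    (l.set i v).getD i 0 = v := by
  rw [List.getD_eq_getElem?_getD, List.getElem?_set_self h]; rfl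

theorem getD_set_ne' (l : List Int) (i j : Nat) (v : Int) (h : i ≠ j) :
    (l.set i v).getD j 0 = l.getD j 0 := by
  rw [List.getD_eq_getElem?_getD, List.getElem?_set_ne h, List.getD_eq_getElem?_getD]

theorem colCnt_cons (c : String) (j : Nat) (r : List String) (rs : List (List String)) :
    (colCnt c j (r :: rs) : Int)
      = (if (r.getD j "" == c) = true then 1 else 0) + (colCnt c j rs : Int) := by
  rw [colCnt, colCnt, List.countP_cons]
  by_cases hm : (r.getD j "" == c) = true
  · rw [if_pos hm, if_pos hm]; push_cast; ring
  · rw [if_neg hm, if_neg hm]; push_cast; ring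

theorem aCol_spec (c : String) (col : Nat) :
    ∀ (pf : List (List String)) (count : Int), (∀ r ∈ pf, col < r.length) → count < 3 →
    aCol c col count pf = decide (3 ≤ count + (colCnt c col pf : Int)) := by
  intro pf
  induction pf with
  | nil =>
    intro count _ hc
    rw [show aCol c col count [] = false from rfl,
      decide_eq_false (by rw [colCnt]; simp only [List.countP_nil]; omega)]
  | cons r rs ih =>
    intro count h hc
    have hr : col < r.length := h r (by simp)
    have hget : r[col]? = some (r.getD col "") := by
      rw [List.getD_eq_getElem?_getD, List.getElem?_eq_getElem hr]; rfl
    by_cases hm : (r.getD col "" == c) = true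
    · by_cases h3 : count + 1 = 3
      · have e3 : ((count + 1) == (3 : Int)) = true := by simp [h3]
        simp only [aCol, hget, hm, if_pos, e3]
        rw [decide_eq_true (show 3 ≤ count + (colCnt c col (r :: rs) : Int) by
          rw [colCnt_cons, if_pos hm]; omega)]
      · have e3 : ((count + 1) == (3 : Int)) = false := by simp [h3]
        simp only [aCol, hget, hm, if_pos, e3, Bool.false_eq_true, if_false]
        rw [ih (count + 1) (fun r hr => h r (List.mem_cons_of_mem _ hr)) (by omega)]
        rw [decide_eq_decide, colCnt_cons, if_pos hm]
        omega
    · have e3 : (count == (3 : Int)) = false := by simp; omega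
      simp only [aCol, hget, hm, Bool.false_eq_true, if_false, e3]
      rw [ih count (fun r hr => h r (List.mem_cons_of_mem _ hr)) hc]
      rw [decide_eq_decide, colCnt_cons, if_neg hm]
      omega

theorem aCols_spec (pf : List (List String)) (c : String) :
    ∀ (L : List Nat), (∀ col ∈ L, ∀ r ∈ pf, col < r.length) →
    aCols pf c L = decide (∃ col ∈ L, 3 ≤ colCnt c col pf) := by
  intro L
  induction L with
  | nil => intro _; rw [show aCols pf c [] = false from rfl, decide_eq_false (by simp)]
  | cons col cols ih =>
    intro h
    rw [aCols, aCol_spec c col pf 0 (h col (by simp)) (by norm_num),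
      ih (fun j hj => h j (List.mem_cons_of_mem _ hj))]
    by_cases h3 : 3 ≤ colCnt c col pf
    · rw [if_pos (decide_eq_true (show 3 ≤ (0:Int) + (colCnt c col pf : Int) by push_cast; omega)),
        decide_eq_true (show ∃ j ∈ col :: cols, 3 ≤ colCnt c j pf from ⟨col, by simp, h3⟩)]
    · rw [if_neg (show ¬ (decide (3 ≤ (0:Int) + (colCnt c col pf : Int)) = true) from by
          rw [decide_eq_false (by push_cast; omega)]; exact Bool.false_ne_true)]
      rw [decide_eq_decide]
      constructor
      · rintro ⟨j, hj, hle⟩; exact ⟨j, List.mem_cons_of_mem _ hj, hle⟩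
      · rintro ⟨j, hj, hle⟩
        rcases List.mem_cons.mp hj with rfl | hj'
        · exact absurd hle h3
        · exact ⟨j, hj', hle⟩

-- bInner returns none iff some visited column was at count 2 and matches; otherwise each
-- visited matching column's count goes up by one.
theorem bInner_spec (row : List String) (c : String) :
    ∀ (L : List Nat) (counts : List Int), L.Nodup →
    (∀ col ∈ L, col < row.length ∧ col < counts.length) →
    ((∃ col ∈ L, counts.getD col 0 = 2 ∧ (row.getD col "" == c) = true) →
        bInner row c L counts = none) ∧
    ((¬ ∃ col ∈ L, counts.getD col 0 = 2 ∧ (row.getD col "" == c) = true) →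
        ∃ counts', bInner row c L counts = some counts' ∧ counts'.length = counts.length ∧
          ∀ col, col < counts.length →
            counts'.getD col 0 = counts.getD col 0
              + (if col ∈ L ∧ (row.getD col "" == c) = true then 1 else 0)) := by
  intro L
  induction L with
  | nil =>
    intro counts _ _
    constructor
    · rintro ⟨j, hj, _⟩
      simp at hj
    · intro _
      refine ⟨counts, rfl, rfl, fun col _ => ?_⟩
      rw [if_neg (by rintro ⟨hj, _⟩; simp at hj)]
      omega
  | cons col cols ih =>
    intro counts hnd h
    have hrow : col < row.length := (h col (by simp)).1
    have hlen : col < counts.length := (h col (by simp)).2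
    have hget : row[col]? = some (row.getD col "") := by
      rw [List.getD_eq_getElem?_getD, List.getElem?_eq_getElem hrow]; rfl
    have hnd' : cols.Nodup := hnd.of_cons
    have hncol : col ∉ cols := (List.nodup_cons.mp hnd).1
    by_cases hm : (row.getD col "" == c) = true
    · have hself : (counts.set col (counts.getD col 0 + 1)).getD col 0 = counts.getD col 0 + 1 :=
        getD_set_self' counts col _ hlen
      have hother : ∀ j, j ≠ col →
          (counts.set col (counts.getD col 0 + 1)).getD j 0 = counts.getD j 0 :=
        fun j hj => getD_set_ne' counts col j _ (Ne.symm hj)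
      by_cases h2 : counts.getD col 0 = 2
      · have e3 : (((counts.set col (counts.getD col 0 + 1)).getD col 0) == (3 : Int)) = true := by
          rw [hself, h2]; decide
        constructor
        · intro _
          simp only [bInner, hget, hm, if_pos, e3]
        · intro hno; exact absurd ⟨col, by simp, h2, hm⟩ hno
      · have e3 : (((counts.set col (counts.getD col 0 + 1)).getD col 0) == (3 : Int)) = false := by
          rw [hself, beq_eq_false_iff_ne]; omega
        have hunf : bInner row c (col :: cols) counts
            = bInner row c cols (counts.set col (counts.getD col 0 + 1)) := by
          simp only [bInner, hget, hm, if_pos, e3, Bool.false_eq_true, if_false]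
        have hlen2 : (counts.set col (counts.getD col 0 + 1)).length = counts.length :=
          List.length_set
        have hrec := ih (counts.set col (counts.getD col 0 + 1)) hnd'
          (fun j hj => ⟨(h j (List.mem_cons_of_mem _ hj)).1,
            by rw [hlen2]; exact (h j (List.mem_cons_of_mem _ hj)).2⟩)
        constructor
        · rintro ⟨j, hjL, hj2, hjm⟩
          rcases List.mem_cons.mp hjL with rfl | hjc
          · exact absurd hj2 h2
          · rw [hunf]
            exact hrec.1 ⟨j, hjc,
              by rw [hother j (by rintro rfl; exact hncol hjc)]; exact hj2, hjm⟩
        · intro hno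
          obtain ⟨counts', he, hl, hv⟩ := hrec.2 (by
            rintro ⟨j, hjc, hj2, hjm⟩
            exact hno ⟨j, List.mem_cons_of_mem _ hjc,
              by rw [← hother j (by rintro rfl; exact hncol hjc)]; exact hj2, hjm⟩)
          refine ⟨counts', by rw [hunf]; exact he, by rw [hl, hlen2], fun j hj => ?_⟩
          rw [hv j (by rw [hlen2]; exact hj)]
          by_cases hjcol : j = col
          · subst hjcol
            rw [hself, if_neg (by rintro ⟨hjc, _⟩; exact hncol hjc), if_pos ⟨by simp, hm⟩]
            omega
          · rw [hother j hjcol]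
            by_cases hjm : (row.getD j "" == c) = true
            · by_cases hjc : j ∈ cols
              · rw [if_pos ⟨hjc, hjm⟩, if_pos ⟨List.mem_cons_of_mem _ hjc, hjm⟩]
              · rw [if_neg (by rintro ⟨hc', _⟩; exact hjc hc'),
                  if_neg (by
                    rintro ⟨hc', _⟩
                    rcases List.mem_cons.mp hc' with rfl | hh
                    · exact hjcol rfl
                    · exact hjc hh)]
            · rw [if_neg (by rintro ⟨_, hmm⟩; exact hjm hmm),
                if_neg (by rintro ⟨_, hmm⟩; exact hjm hmm)]
    · have hunf : bInner row c (col :: cols) counts = bInner row c cols counts := by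
        simp only [bInner, hget, hm, Bool.false_eq_true, if_false]
      have hrec := ih counts hnd' (fun j hj => h j (List.mem_cons_of_mem _ hj))
      constructor
      · rintro ⟨j, hjL, hj2, hjm⟩
        rcases List.mem_cons.mp hjL with rfl | hjc
        · exact absurd hjm hm
        · rw [hunf]; exact hrec.1 ⟨j, hjc, hj2, hjm⟩
      · intro hno
        obtain ⟨counts', he, hl, hv⟩ := hrec.2 (by
          rintro ⟨j, hjc, hj2, hjm⟩; exact hno ⟨j, List.mem_cons_of_mem _ hjc, hj2, hjm⟩)
        refine ⟨counts', by rw [hunf]; exact he, hl, fun j hj => ?_⟩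
        rw [hv j hj]
        by_cases hjcol : j = col
        · subst hjcol
          rw [if_neg (by rintro ⟨hjc, _⟩; exact hncol hjc),
            if_neg (by rintro ⟨_, hmm⟩; exact hm hmm)]
        · by_cases hjm : (row.getD j "" == c) = true
          · by_cases hjc : j ∈ cols
            · rw [if_pos ⟨hjc, hjm⟩, if_pos ⟨List.mem_cons_of_mem _ hjc, hjm⟩]
            · rw [if_neg (by rintro ⟨hc', _⟩; exact hjc hc'),
                if_neg (by
                  rintro ⟨hc', _⟩
                  rcases List.mem_cons.mp hc' with rfl | hh
                  · exact hjcol rfl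
                  · exact hjc hh)]
          · rw [if_neg (by rintro ⟨_, hmm⟩; exact hjm hmm),
              if_neg (by rintro ⟨_, hmm⟩; exact hjm hmm)]

theorem bOuter_spec (c : String) :
    ∀ (pf : List (List String)) (counts : List Int),
    (∀ r ∈ pf, counts.length ≤ r.length) →
    (∀ col, col < counts.length → counts.getD col 0 < 3) →
    bOuter c pf counts
      = decide (∃ col, col < counts.length ∧ 3 ≤ counts.getD col 0 + (colCnt c col pf : Int)) := by
  intro pf
  induction pf with
  | nil =>
    intro counts _ hlt
    rw [show bOuter c [] counts = false from rfl,
      decide_eq_false (by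
        rintro ⟨j, hj, h3⟩
        have := hlt j hj
        rw [colCnt] at h3
        simp only [List.countP_nil] at h3
        omega)]
  | cons r rs ih =>
    intro counts hlenR hlt
    have hr : counts.length ≤ r.length := hlenR r (by simp)
    have hspec := bInner_spec r c (List.range counts.length) counts List.nodup_range
      (fun j hj => ⟨by have := List.mem_range.mp hj; omega, List.mem_range.mp hj⟩)
    by_cases hex : ∃ j ∈ List.range counts.length, counts.getD j 0 = 2 ∧ (r.getD j "" == c) = true
    · have hunf : bOuter c (r :: rs) counts = true := by rw [bOuter, hspec.1 hex]
      rw [hunf]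
      obtain ⟨j, hjr, hj2, hjm⟩ := hex
      have hjlt := List.mem_range.mp hjr
      rw [decide_eq_true ⟨j, hjlt, by rw [colCnt_cons, if_pos hjm, hj2]; omega⟩]
    · obtain ⟨counts', he, hl, hv⟩ := hspec.2 hex
      have hunf : bOuter c (r :: rs) counts = bOuter c rs counts' := by rw [bOuter, he]
      rw [hunf]
      have hlt' : ∀ j, j < counts'.length → counts'.getD j 0 < 3 := by
        intro j hj
        rw [hl] at hj
        rw [hv j hj]
        by_cases hm : j ∈ List.range counts.length ∧ (r.getD j "" == c) = true
        · rw [if_pos hm]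
          have := hlt j hj
          by_cases h2 : counts.getD j 0 = 2
          · exact absurd ⟨j, hm.1, h2, hm.2⟩ hex
          · omega
        · rw [if_neg hm]
          have := hlt j hj
          omega
      rw [ih counts' (fun r' hr' => by rw [hl]; exact hlenR r' (List.mem_cons_of_mem _ hr')) hlt']
      rw [decide_eq_decide]
      constructor
      · rintro ⟨j, hj, h3⟩
        rw [hl] at hj
        refine ⟨j, hj, ?_⟩
        rw [hv j hj] at h3
        rw [colCnt_cons]
        by_cases hm : (r.getD j "" == c) = true
        · rw [if_pos hm]
          rw [if_pos ⟨List.mem_range.mpr hj, hm⟩] at h3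
          omega
        · rw [if_neg hm]
          rw [if_neg (by rintro ⟨_, hmm⟩; exact hm hmm)] at h3
          omega
      · rintro ⟨j, hj, h3⟩
        refine ⟨j, by rw [hl]; exact hj, ?_⟩
        rw [hv j hj]
        rw [colCnt_cons] at h3
        by_cases hm : (r.getD j "" == c) = true
        · rw [if_pos hm] at h3
          rw [if_pos ⟨List.mem_range.mpr hj, hm⟩]
          omega
        · rw [if_neg hm] at h3
          rw [if_neg (by rintro ⟨_, hmm⟩; exact hm hmm)]
          omega

-- ===== VERDICT (by name: the statement is the Claim_ definition above) =====
theorem is_column_win_spec : Claim_equal_is_column_win := by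
  intro pf c _ hpre
  unfold Spec_is_column_win
  obtain ⟨hne, hlen⟩ := hpre
  cases pf with
  | nil => exact absurd rfl hne
  | cons r0 rest =>
    have hlen' : ∀ r ∈ r0 :: rest, r0.length ≤ r.length := by
      intro r hr
      have := hlen r hr
      simpa using this
    rw [is_column_win, is_column_win_alt]
    rw [aCols_spec (r0 :: rest) c (List.range r0.length)
      (fun col hcol r hr => lt_of_lt_of_le (List.mem_range.mp hcol) (hlen' r hr))]
    have hrep : ∀ j, j < r0.length → (List.replicate r0.length (0 : Int)).getD j 0 = 0 := by
      intro j hj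
      rw [List.getD_eq_getElem?_getD, List.getElem?_replicate_of_lt hj]; rfl
    rw [bOuter_spec c (r0 :: rest) (List.replicate r0.length 0)
      (by intro r hr; rw [List.length_replicate]; exact hlen' r hr)
      (by intro j hj; rw [List.length_replicate] at hj; rw [hrep j hj]; norm_num)]
    rw [decide_eq_decide]
    constructor
    · rintro ⟨j, hj, h3⟩
      have hjl := List.mem_range.mp hj
      refine ⟨j, by rw [List.length_replicate]; exact hjl, ?_⟩
      rw [hrep j hjl]
      omega
    · rintro ⟨j, hj, h3⟩
      rw [List.length_replicate] at hj
      rw [hrep j hj] at h3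
      exact ⟨j, List.mem_range.mpr hj, by omega⟩
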